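-- pv_equiv track=rewrite | github.com/sugenius77/Algorithm-Study | 프로그래머스/unrated/138476. 귤 고르기/귤 고르기.py | solution
-- ===== SOURCE A (Python) =====
-- from collections import Counter
--
-- def solution(k, tangerine):
--     answer = 0
--     count = Counter(tangerine)
--
--     new_list = sorted(list(count.items()), key = lambda x:x[1], reverse = True)
--
--     for i in new_list:
--         k -= i[1]
--         if k == 0:
--             answer += 1
--             break
--         if k < 0:
--             answer += 1
--             break
--         else:
--             answer += 1
--     return answer
-- ===== SOURCE B (Python) =====
-- from collections import Counter
-- from itertools import accumulate
-- from bisect import bisect_left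
--
-- def solution(k, tangerine):
--     counts = sorted(Counter(tangerine).values(), reverse=True)
--     prefix = list(accumulate(counts))
--     idx = bisect_left(prefix, k)
--     return min(idx + 1, len(counts))
-- ===== Notes on version B (the rewrite author's own statement) =====
-- stated objective: alternative
-- what changed: A's single greedy loop with break over sorted (key,count) items is replaced by sorting the counts alone, building a prefix-sum coverage table with itertools.accumulate and binary-searching it with bisect_left, returning min(idx+1, number of distinct sizes).
import Mathlib
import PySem

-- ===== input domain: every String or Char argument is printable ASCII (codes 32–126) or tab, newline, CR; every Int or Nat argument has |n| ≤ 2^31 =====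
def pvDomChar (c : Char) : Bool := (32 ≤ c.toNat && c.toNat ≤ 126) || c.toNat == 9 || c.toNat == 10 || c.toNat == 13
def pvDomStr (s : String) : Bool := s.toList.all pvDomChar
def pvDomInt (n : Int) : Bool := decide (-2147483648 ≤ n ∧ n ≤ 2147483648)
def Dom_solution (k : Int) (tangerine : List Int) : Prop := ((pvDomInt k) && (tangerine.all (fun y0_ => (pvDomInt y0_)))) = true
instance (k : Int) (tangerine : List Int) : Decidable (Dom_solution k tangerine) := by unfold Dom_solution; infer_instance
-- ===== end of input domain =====

-- B replaces A's greedy break-loop over sorted (size, count) items with a prefix-sum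
-- table of the descending counts plus a bisect_left lookup (alternative decomposition).

-- ===== PORT A =====
-- the for-loop with break, state (k, answer)
def pyLoopA : Int → List (Int × Int) → Int → Int
  | _, [], answer => answer
  | k, i :: rest, answer =>
    let k' := k - i.2
    if k' = 0 then answer + 1
    else if k' < 0 then answer + 1
    else pyLoopA k' rest (answer + 1)

def solution (k : Int) (tangerine : List Int) : Int :=
  let count := PySem.Dict.counter tangerine
  let new_list := PySem.List.sorted count.items (fun x => x.2) true
  pyLoopA k new_list 0

-- ===== PORT B =====
-- itertools.accumulate: running sums
def pyAccumulate : Int → List Int → List Int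
  | _, [] => []
  | acc, c :: rest => (acc + c) :: pyAccumulate (acc + c) rest

-- bisect.bisect_left on a sorted (nondecreasing) list: number of leading elements < k (exact there)
def pyBisectLeft (xs : List Int) (k : Int) : Int :=
  ((xs.takeWhile (fun p => decide (p < k))).length : Int)

def solution_alt (k : Int) (tangerine : List Int) : Int :=
  let counts := PySem.List.sorted (PySem.Dict.counter tangerine).values (fun x => x) true
  let pref := pyAccumulate 0 counts
  let idx := pyBisectLeft pref k
  min (idx + 1) (counts.length : Int)

-- ===== PRECONDITION & SPEC =====
def Spec_solution (k : Int) (tangerine : List Int) (out : Int) : Prop := out = solution_alt k tangerine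
instance (k : Int) (tangerine : List Int) (out : Int) : Decidable (Spec_solution k tangerine out) := by unfold Spec_solution; infer_instance

-- ===== CLAIM (what is proved, stated in full; the proofs are below) =====
def Claim_equal_solution : Prop := ∀ (k : Int) (tangerine : List Int), Dom_solution k tangerine → Spec_solution k tangerine (solution k tangerine)

-- ===== LEMMAS AND PROOFS =====

-- projecting the second components commutes with insertBy when the order uses only them
lemma map_snd_insertBy (x : Int × Int) (ys : List (Int × Int)) :
    (PySem.List.insertBy (fun a b => decide ((b : Int × Int).2 < a.2)) x ys).map (·.2)
      = PySem.List.insertBy (fun a b => decide (b < a)) x.2 (ys.map (·.2)) := by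
  induction ys with
  | nil => simp [PySem.List.insertBy]
  | cons y ys ih =>
    simp only [PySem.List.insertBy, List.map_cons]
    by_cases h : y.2 < x.2
    · simp [h]
    · simp [h, ih]

-- projecting commutes with the whole insertion sort (reverse=True, key = snd)
lemma map_snd_sorted_rev (xs : List (Int × Int)) :
    (PySem.List.sorted xs (fun x => x.2) true).map (·.2)
      = PySem.List.sorted (xs.map (·.2)) (fun x => x) true := by
  rw [PySem.List.sorted_rev_eq_foldl_insertBy xs (fun x => x.2),
      PySem.List.sorted_rev_eq_foldl_insertBy (xs.map (·.2)) (fun x => x)]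
  suffices h : ∀ (acc : List (Int × Int)),
      (xs.foldl (fun acc x => PySem.List.insertBy (fun a b => decide ((b : Int × Int).2 < a.2)) x acc) acc).map (·.2)
        = (xs.map (·.2)).foldl (fun acc c => PySem.List.insertBy (fun a b => decide (b < a)) c acc) (acc.map (·.2)) by
    simpa using h []
  induction xs with
  | nil => intro acc; simp
  | cons x xs ih =>
    intro acc
    simp only [List.foldl_cons, List.map_cons]
    rw [ih, map_snd_insertBy]

lemma accumulate_shift (cs : List Int) : ∀ (a b : Int),
    pyAccumulate (a + b) cs = (pyAccumulate b cs).map (fun q => a + q) := by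
  induction cs with
  | nil => intro a b; simp [pyAccumulate]
  | cons c rest ih =>
    intro a b
    simp only [pyAccumulate, List.map_cons]
    rw [add_assoc, ih a (b + c)]

-- A's loop computes B's min(bisect_left(prefix, k)+1, len) formula, for any count list
lemma loopA_formula (cs : List (Int × Int)) : ∀ (k a : Int),
    pyLoopA k cs a
      = a + min ((((pyAccumulate 0 (cs.map (·.2))).takeWhile (fun p => decide (p < k))).length : Int) + 1)
              (cs.length : Int) := by
  induction cs with
  | nil =>
    intro k a
    simp only [pyLoopA, List.map_nil, pyAccumulate, List.takeWhile_nil, List.length_nil]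
    omega
  | cons c rest ih =>
    intro k a
    simp only [pyLoopA, List.map_cons, pyAccumulate, List.length_cons]
    by_cases h : c.2 < k
    · have hk : ¬ (k - c.2 = 0) := by omega
      have hk' : ¬ (k - c.2 < 0) := by omega
      rw [if_neg hk, if_neg hk', ih (k - c.2) (a + 1)]
      have hshift : pyAccumulate (0 + c.2) (rest.map (·.2))
          = (pyAccumulate 0 (rest.map (·.2))).map (fun q => c.2 + q) := by
        have := accumulate_shift (rest.map (·.2)) c.2 0
        simpa [add_comm] using this
      have hpred : (fun p => decide (p < k)) ∘ (fun q => c.2 + q)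
          = (fun p => decide (p < k - c.2)) := by
        funext q; simp; omega
      have htw : (((pyAccumulate (0 + c.2) (rest.map (·.2))).takeWhile (fun p => decide (p < k))).length : Int)
          = (((pyAccumulate 0 (rest.map (·.2))).takeWhile (fun p => decide (p < k - c.2))).length : Int) := by
        rw [hshift, List.takeWhile_map, hpred, List.length_map]
      have hhead : decide ((0 + c.2 : Int) < k) = true := by simpa using h
      rw [List.takeWhile_cons, hhead]
      simp only [if_true, List.length_cons]
      push_cast
      rw [htw]
      omega
    · have hhead : decide ((0 + c.2 : Int) < k) = false := by simpa using h
      rw [List.takeWhile_cons, hhead]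
      simp only [Bool.false_eq_true, if_false, List.length_nil]
      have hlen : (0 : Int) ≤ (rest.length : Int) := by positivity
      by_cases h0 : k - c.2 = 0
      · rw [if_pos h0]; omega
      · rw [if_neg h0, if_pos (by omega : k - c.2 < 0)]; omega

-- ===== VERDICT (by name: the statement is the Claim_ definition above) =====
theorem solution_spec : Claim_equal_solution := by
  intro k tangerine _
  unfold Spec_solution solution solution_alt
  simp only []
  rw [loopA_formula]
  have hmap : ((PySem.List.sorted (PySem.Dict.counter tangerine).items (fun x => x.2) true).map (·.2))
      = PySem.List.sorted (PySem.Dict.counter tangerine).values (fun x => x) true := by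
    rw [map_snd_sorted_rev]; rfl
  have hlen : ((PySem.List.sorted (PySem.Dict.counter tangerine).items (fun x => x.2) true).length : Int)
      = ((PySem.List.sorted (PySem.Dict.counter tangerine).values (fun x => x) true).length : Int) := by
    rw [← hmap, List.length_map]
  rw [hmap, hlen]; unfold pyBisectLeft
  omega
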